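-- pv_equiv track=rewrite | github.com/dalasor/yandex-algorithms | Extra/logic_task.py | count_new
-- ===== SOURCE A (Python) =====
-- def count_new(n: int) -> int:
--     s = 0
--     for j in range(1, n + 1):
--         z = j
--         while z > 0:
--             s += 1
--             z = z // 10
--     return s
-- ===== SOURCE B (Python) =====
-- def count_new(n: int) -> int:
--     # closed-form: numbers with d digits occupy [p, 10p-1], p = 10**(d-1)
--     s = 0
--     p = 1
--     d = 1
--     while p <= n:
--         s += d * (min(n, 10 * p - 1) - p + 1)
--         p *= 10
--         d += 1
--     return s
-- ===== Notes on version B (the rewrite author's own statement) =====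
-- stated objective: faster
-- what changed: Replaces the per-number inner digit-count loop over 1..n by a closed-form summation over digit-length decades [10^(d-1), min(n,10^d-1)].
import Mathlib
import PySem

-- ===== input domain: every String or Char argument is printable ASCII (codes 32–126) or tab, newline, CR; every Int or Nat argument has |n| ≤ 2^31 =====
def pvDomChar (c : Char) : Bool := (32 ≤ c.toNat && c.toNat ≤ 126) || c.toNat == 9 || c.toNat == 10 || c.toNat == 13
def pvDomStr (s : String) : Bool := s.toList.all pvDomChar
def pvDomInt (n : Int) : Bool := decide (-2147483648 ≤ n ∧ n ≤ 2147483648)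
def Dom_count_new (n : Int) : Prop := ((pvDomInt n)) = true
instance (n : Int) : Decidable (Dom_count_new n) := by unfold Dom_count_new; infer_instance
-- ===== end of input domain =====

-- B replaces A's per-number inner digit loop by a closed-form sum over digit-length
-- decades, O(log n) instead of O(n log n); return values agree for every n.

-- ===== PORT A =====
-- inner 'while z > 0: s += 1; z = z // 10'
def innerLoop (s z : Int) : Int :=
  if h : 0 < z then innerLoop (s + 1) (PySem.Int.floordiv z 10) else s
termination_by z.toNat
decreasing_by
  have h1 : PySem.Int.floordiv z 10 < z :=
    (PySem.Int.floordiv_lt_iff_lt_mul (show (0:Int) < 10 by omega)).mpr (by omega)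
  omega

def count_new (n : Int) : Int :=
  (PySem.List.pyRange 1 (n + 1) 1).foldl (fun s j => innerLoop s j) 0

-- ===== PORT B =====
-- 'while p <= n: s += d*(min(n, 10*p-1) - p + 1); p *= 10; d += 1'
-- (p starts at 1 and is only multiplied by 10, so 1 ≤ p is an invariant; it is
-- carried as a hypothesis purely for termination)
def altLoop (n s p d : Int) (hp : 1 ≤ p) : Int :=
  if p ≤ n then
    altLoop n (s + d * (min n (10 * p - 1) - p + 1)) (10 * p) (d + 1) (by omega)
  else s
termination_by (n + 1 - p).toNat
decreasing_by omega

def count_new_alt (n : Int) : Int := altLoop n 0 1 1 (by norm_num)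

-- ===== PRECONDITION & SPEC =====
def Spec_count_new (n : Int) (out : Int) : Prop := out = count_new_alt n
instance (n : Int) (out : Int) : Decidable (Spec_count_new n out) := by unfold Spec_count_new; infer_instance

-- ===== CLAIM (what is proved, stated in full; the proofs are below) =====
def Claim_equal_count_new : Prop := ∀ (n : Int), Dom_count_new n → Spec_count_new n (count_new n)

-- ===== LEMMAS AND PROOFS =====

-- number of decimal digits of z (0 for z ≤ 0)
def digitsI (z : Int) : Int :=
  if h : 0 < z then 1 + digitsI (PySem.Int.floordiv z 10) else 0
termination_by z.toNat
decreasing_by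
  have h1 : PySem.Int.floordiv z 10 < z :=
    (PySem.Int.floordiv_lt_iff_lt_mul (show (0:Int) < 10 by omega)).mpr (by omega)
  omega

-- ∑_{j=p}^{n} digitsI j
def sumDig (p n : Int) : Int :=
  if p ≤ n then digitsI p + sumDig (p + 1) n else 0
termination_by (n + 1 - p).toNat
decreasing_by omega

theorem sumDig_pos {p n : Int} (h : p ≤ n) : sumDig p n = digitsI p + sumDig (p + 1) n := by
  rw [sumDig, if_pos h]

theorem sumDig_neg {p n : Int} (h : ¬ p ≤ n) : sumDig p n = 0 := by
  rw [sumDig, if_neg h]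

theorem innerLoop_eq (z : Int) : ∀ s, innerLoop s z = s + digitsI z := by
  induction z using digitsI.induct with
  | case1 z h ih =>
      intro s; rw [innerLoop, digitsI, dif_pos h, dif_pos h, ih]; ring
  | case2 z h =>
      intro s; rw [innerLoop, digitsI, dif_neg h, dif_neg h]; ring

theorem sumDig_snoc (n : Int) :
    ∀ p, p ≤ n → sumDig p n = sumDig p (n - 1) + digitsI n := by
  refine sumDig.induct n
      (fun p => p ≤ n → sumDig p n = sumDig p (n - 1) + digitsI n) ?_ ?_
  · intro p hpn ih _
    by_cases he : p = n
    · subst he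
      rw [sumDig_pos (le_refl p), sumDig_neg (show ¬ p + 1 ≤ p by omega),
          sumDig_neg (show ¬ p ≤ p - 1 by omega)]
      ring
    · rw [sumDig_pos hpn, ih (by omega), sumDig_pos (show p ≤ n - 1 by omega)]
      ring
  · intro p hpn _
    omega

theorem sumDig_const (q d : Int) :
    ∀ p, p ≤ q + 1 → (∀ j, p ≤ j → j ≤ q → digitsI j = d) →
      sumDig p q = d * (q - p + 1) := by
  refine sumDig.induct q
      (fun p => p ≤ q + 1 → (∀ j, p ≤ j → j ≤ q → digitsI j = d) →
        sumDig p q = d * (q - p + 1)) ?_ ?_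
  · intro p hpq ih _ hconst
    rw [sumDig_pos hpq, ih (by omega) (fun j h1 h2 => hconst j (by omega) h2),
        hconst p (le_refl p) hpq]
    ring
  · intro p hpq hle _
    rw [sumDig_neg hpq]
    have he : p = q + 1 := by omega
    subst he; ring

theorem sumDig_split (n q : Int) :
    ∀ p, p ≤ q → q ≤ n + 1 → sumDig p n = sumDig p (q - 1) + sumDig q n := by
  refine sumDig.induct (q - 1)
      (fun p => p ≤ q → q ≤ n + 1 → sumDig p n = sumDig p (q - 1) + sumDig q n) ?_ ?_
  · intro p hpq ih _ hqn
    rw [sumDig_pos (show p ≤ n by omega), ih (by omega) hqn,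
        sumDig_pos (show p ≤ q - 1 by omega)]
    ring
  · intro p hpq hpq' _
    have he : p = q := by omega
    rw [he, sumDig_neg (show ¬ q ≤ q - 1 by omega)]
    ring

-- all of [p, 10p-1] has d digits → all of [10p, 100p-1] has d+1 digits
theorem decade_step (p d : Int)
    (H : ∀ j, p ≤ j → j ≤ 10 * p - 1 → digitsI j = d) :
    ∀ j, 10 * p ≤ j → j ≤ 10 * (10 * p) - 1 → digitsI j = d + 1 := by
  intro j h1 h2
  rw [digitsI, dif_pos (show (0:Int) < j by omega)]
  have hlo : p ≤ PySem.Int.floordiv j 10 :=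
    (PySem.Int.le_floordiv_iff_mul_le (show (0:Int) < 10 by omega)).mpr (by omega)
  have hhi : PySem.Int.floordiv j 10 < 10 * p :=
    (PySem.Int.floordiv_lt_iff_lt_mul (show (0:Int) < 10 by omega)).mpr (by omega)
  rw [H _ hlo (by omega)]; ring

theorem decade_base : ∀ j, (1:Int) ≤ j → j ≤ 10 * 1 - 1 → digitsI j = 1 := by
  intro j h1 h2
  rw [digitsI, dif_pos (show (0:Int) < j by omega)]
  have h0 : PySem.Int.floordiv j 10 = 0 :=
    (PySem.Int.floordiv_eq_iff_of_pos (show (0:Int) < 10 by omega)).mpr (by omega)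
  rw [h0, digitsI, dif_neg (show ¬ (0:Int) < 0 by omega)]
  ring

theorem altLoop_pos {n s p d : Int} {hp : 1 ≤ p} (h : p ≤ n) :
    altLoop n s p d hp =
      altLoop n (s + d * (min n (10 * p - 1) - p + 1)) (10 * p) (d + 1) (by omega) := by
  rw [altLoop, if_pos h]

theorem altLoop_neg {n s p d : Int} {hp : 1 ≤ p} (h : ¬ p ≤ n) : altLoop n s p d hp = s := by
  rw [altLoop, if_neg h]

theorem altLoop_eq (k : Nat) : ∀ (n p s d : Int) (hp : 1 ≤ p), (n + 1 - p).toNat ≤ k →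
    (∀ j, p ≤ j → j ≤ 10 * p - 1 → digitsI j = d) →
    altLoop n s p d hp = s + sumDig p n := by
  induction k with
  | zero =>
      intro n p s d hp hk H
      have hpn : ¬ p ≤ n := by omega
      rw [altLoop_neg hpn, sumDig_neg hpn]; ring
  | succ k ih =>
      intro n p s d hp hk H
      by_cases hpn : p ≤ n
      · rw [altLoop_pos hpn]
        by_cases hbig : 10 * p ≤ n
        · -- full decade inside [p, n]
          rw [ih n (10 * p) (s + d * (min n (10 * p - 1) - p + 1)) (d + 1) (by omega)
                (by omega) (decade_step p d H),
              sumDig_split n (10 * p) p (by omega) (by omega),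
              sumDig_const (10 * p - 1) d p (by omega) (fun j h1 h2 => H j h1 (by omega))]
          have hmin : min n (10 * p - 1) = 10 * p - 1 := by omega
          rw [hmin]; ring
        · -- last, partial decade: the next iteration exits immediately
          rw [altLoop_neg (show ¬ 10 * p ≤ n by omega),
              sumDig_const n d p (by omega) (fun j h1 h2 => H j h1 (by omega))]
          have hmin : min n (10 * p - 1) = n := by omega
          rw [hmin]
      · rw [altLoop_neg hpn, sumDig_neg hpn]; ring

theorem count_new_eq_sumDig (n : Int) : count_new n = sumDig 1 n := by
  by_cases hn : n ≤ 0
  · unfold count_new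
    rw [PySem.List.pyRange_one_eq_nil (by omega), sumDig_neg (show ¬ (1:Int) ≤ n by omega)]
    rfl
  · have key : ∀ (k : Nat) (m : Int), m.toNat = k → 0 ≤ m → count_new m = sumDig 1 m := by
      intro k
      induction k with
      | zero =>
          intro m hm h0
          have : m = 0 := by omega
          subst this
          unfold count_new
          rw [PySem.List.pyRange_one_eq_nil (by omega),
              sumDig_neg (show ¬ (1:Int) ≤ 0 by omega)]
          rfl
      | succ k ih =>
          intro m hm h0
          have h1 : (1:Int) ≤ m := by omega
          unfold count_new
          rw [show m + 1 = (m - 1) + 1 + 1 by ring,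
              PySem.List.pyRange_one_succ_right (show (1:Int) ≤ (m - 1) + 1 by omega),
              show (m - 1) + 1 = m by ring, List.foldl_append]
          have hrec := ih (m - 1) (by omega) (by omega)
          unfold count_new at hrec
          rw [show (m - 1) + 1 = m by ring] at hrec
          rw [hrec, List.foldl_cons, List.foldl_nil, innerLoop_eq, sumDig_snoc m 1 h1]
    exact key n.toNat n rfl (by omega)

-- ===== VERDICT (by name: the statement is the Claim_ definition above) =====
theorem count_new_spec : Claim_equal_count_new := by
  intro n _
  unfold Spec_count_new count_new_alt
  rw [altLoop_eq n.toNat n 1 0 1 (by norm_num) (by omega) decade_base,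
      count_new_eq_sumDig]
  ring
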